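-- pv_equiv track=rewrite | github.com/connormason/youtube-dl | youtube_dl/extractor/common.py | _xpath_ns
-- ===== SOURCE A (Python) =====
-- def _xpath_ns(path, namespace=None):
--     if not namespace:
--         return path
--     out = []
--     for c in path.split('/'):
--         if not c or c == '.':
--             out.append(c)
--         else:
--             out.append(f'{{{namespace}}}{c}')
--     return '/'.join(out)
-- ===== SOURCE B (Python) =====
-- import re
--
-- def _xpath_ns(path, namespace=None):
--     if not namespace:
--         return path
--     return re.sub(
--         r'[^/]+',
--         lambda m: m.group(0) if m.group(0) == '.' else '{%s}%s' % (namespace, m.group(0)),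
--         path)
-- ===== Notes on version B (the rewrite author's own statement) =====
-- stated objective: idiomatic
-- what changed: Replaces the split/loop/append/join pipeline with a single regex substitution whose callback prefixes each maximal non-slash run with the namespace unless the run is a lone dot.
import Mathlib
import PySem

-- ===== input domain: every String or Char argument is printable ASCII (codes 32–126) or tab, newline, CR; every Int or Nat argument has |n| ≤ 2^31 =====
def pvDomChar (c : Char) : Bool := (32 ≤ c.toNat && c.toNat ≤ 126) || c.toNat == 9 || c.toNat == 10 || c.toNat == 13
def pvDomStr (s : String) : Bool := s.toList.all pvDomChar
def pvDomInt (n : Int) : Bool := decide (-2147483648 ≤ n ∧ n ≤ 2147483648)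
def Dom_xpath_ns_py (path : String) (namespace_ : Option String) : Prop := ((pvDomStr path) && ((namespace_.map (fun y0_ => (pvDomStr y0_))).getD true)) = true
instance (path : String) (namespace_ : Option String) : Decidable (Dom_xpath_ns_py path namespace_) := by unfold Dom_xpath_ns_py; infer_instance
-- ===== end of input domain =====

-- B replaces A's split/loop/join with one regex substitution over maximal non-slash runs (idiomatic; return value only, no side effects involved).

-- ===== PORT A =====
-- A: split on '/', prefix each non-empty component other than '.', join back with '/'.
def xpath_ns_py (path : String) (namespace_ : Option String) : String :=
  match namespace_ with
  | none => path                           -- 'if not namespace: return path'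
  | some ns =>
    if ns = "" then path                   -- '' is falsy too
    else
      -- out = []; for c in path.split('/'): append c or '{ns}'+c
      let out : List (List Char) :=
        (PySem.Chars.splitOn path.toList ['/']).foldl
          (fun out c => out ++ [if c = [] ∨ c = ['.'] then c else '{' :: ns.toList ++ '}' :: c]) []
      String.ofList (PySem.Chars.join ['/'] out)   -- '/'.join(out)

-- ===== PORT B =====
-- regex callback: m.group(0) if it is '.', else '{ns}' + m.group(0)
def pvAltRepl (ns : List Char) (run : List Char) : List Char :=
  if run = ['.'] then run else '{' :: ns ++ '}' :: run

-- hand port of re.sub(r'[^/]+', repl, path): scan the string; a '/' is copied,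
-- otherwise the maximal non-slash run starting here is replaced and the scan resumes
-- after it.  Exact for this pattern: '[^/]+' matches exactly the maximal non-slash runs.
def pvAltGo (ns : List Char) : List Char → List Char
  | [] => []
  | c :: rest =>
    if c = '/' then '/' :: pvAltGo ns rest
    else pvAltRepl ns (c :: rest.takeWhile (· ≠ '/')) ++ pvAltGo ns (rest.dropWhile (· ≠ '/'))
termination_by l => l.length
decreasing_by simp; exact Nat.lt_succ_of_le (List.length_dropWhile_le _ _)

def xpath_ns_py_alt (path : String) (namespace_ : Option String) : String :=
  match namespace_ with
  | none => path
  | some ns =>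
    if ns = "" then path
    else String.ofList (pvAltGo ns.toList path.toList)

-- ===== PRECONDITION & SPEC =====
def Spec_xpath_ns_py (path : String) (namespace_ : Option String) (out : String) : Prop := out = xpath_ns_py_alt path namespace_
instance (path : String) (namespace_ : Option String) (out : String) : Decidable (Spec_xpath_ns_py path namespace_ out) := by unfold Spec_xpath_ns_py; infer_instance

-- ===== CLAIM (what is proved, stated in full; the proofs are below) =====
def Claim_equal_xpath_ns_py : Prop := ∀ (path : String) (namespace_ : Option String), Dom_xpath_ns_py path namespace_ → Spec_xpath_ns_py path namespace_ (xpath_ns_py path namespace_)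

-- ===== LEMMAS AND PROOFS =====

-- structural characterisation of splitting on a single '/'
def pvSplitSpec : List Char → List (List Char)
  | [] => [[]]
  | c :: rest => if c = '/' then [] :: pvSplitSpec rest else (pvSplitSpec rest).modifyHead (c :: ·)

theorem pvSplitSpec_ne_nil (cs : List Char) : pvSplitSpec cs ≠ [] := by
  cases cs with
  | nil => simp [pvSplitSpec]
  | cons c rest =>
    simp only [pvSplitSpec]
    split_ifs
    · simp
    · cases h : pvSplitSpec rest with
      | nil => exact absurd h (pvSplitSpec_ne_nil rest)
      | cons p ps => simp [h]

theorem pv_go_spec (l : List Char) : ∀ (fuel : Nat) (cur : List Char) (acc : List (List Char)),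
    l.length ≤ fuel →
    PySem.Chars.splitOn.go ['/'] fuel l cur acc
      = acc.reverse ++ (pvSplitSpec l).modifyHead (cur.reverse ++ ·) := by
  induction l with
  | nil =>
    intro fuel cur acc _
    cases fuel <;> simp [PySem.Chars.splitOn.go, pvSplitSpec]
  | cons c rest ih =>
    intro fuel cur acc hf
    cases fuel with
    | zero => simp at hf
    | succ f =>
      simp only [PySem.Chars.splitOn.go]
      by_cases hc : c = '/'
      · subst hc
        rw [if_pos (by simp [List.isPrefixOf])]
        rw [show List.drop ['/'].length ('/' :: rest) = rest from rfl]
        rw [ih f [] _ (Nat.le_of_succ_le_succ (by simpa using hf))]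
        simp only [pvSplitSpec, if_pos rfl]
        cases h : pvSplitSpec rest with
        | nil => exact absurd h (pvSplitSpec_ne_nil rest)
        | cons p ps => simp [h]
      · rw [if_neg (by simp [List.isPrefixOf]; exact fun h => hc h.symm)]
        rw [ih f (c :: cur) acc (Nat.le_of_succ_le_succ hf)]
        simp only [pvSplitSpec, if_neg hc]
        cases h : pvSplitSpec rest with
        | nil => exact absurd h (pvSplitSpec_ne_nil rest)
        | cons p ps => simp [h]

theorem pv_splitOn_eq (cs : List Char) : PySem.Chars.splitOn cs ['/'] = pvSplitSpec cs := by
  unfold PySem.Chars.splitOn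
  rw [pv_go_spec cs (cs.length + 1) [] [] (Nat.le_succ _)]
  cases h : pvSplitSpec cs with
  | nil => exact absurd h (pvSplitSpec_ne_nil cs)
  | cons p ps => simp

theorem pv_foldl_map {α β : Type} (f : α → β) (l : List α) (acc : List β) :
    l.foldl (fun out c => out ++ [f c]) acc = acc ++ l.map f := by
  induction l generalizing acc with
  | nil => simp
  | cons c rest ih => simp [ih]

-- head/tail form of pvSplitSpec on a string starting with a non-slash character
theorem pvSplitSpec_head (c : Char) (rest : List Char) (hc : c ≠ '/') :
    pvSplitSpec (c :: rest)
      = (c :: rest.takeWhile (· ≠ '/')) ::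
        (match rest.dropWhile (· ≠ '/') with | [] => [] | _ :: r => pvSplitSpec r) := by
  induction rest generalizing c with
  | nil => simp [pvSplitSpec, hc]
  | cons d r ih =>
    by_cases hd : d = '/'
    · subst hd
      simp only [pvSplitSpec, if_neg hc, if_pos rfl]
      simp [List.takeWhile, List.dropWhile]
    · have := ih d hd
      simp only [pvSplitSpec, if_neg hc] at *
      rw [this]
      simp [List.takeWhile, List.dropWhile, hd, hc]

-- the core equivalence: joining A's per-component rewrites = B's regex-style scan
theorem pv_dropWhile_head_false {p : Char → Bool} (l : List Char) (d : Char) (r : List Char)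
    (h : l.dropWhile p = d :: r) : p d = false := by
  induction l with
  | nil => simp [List.dropWhile] at h
  | cons x xs ih =>
    rw [List.dropWhile_cons] at h
    split at h
    · exact ih h
    · cases h; simp_all

theorem pv_f_eq_repl (ns run : List Char) (h : run ≠ []) :
    (if run = [] ∨ run = ['.'] then run else '{' :: ns ++ '}' :: run) = pvAltRepl ns run := by
  unfold pvAltRepl
  by_cases hd : run = ['.'] <;> simp [h, hd]

theorem pv_core (ns : List Char) (cs : List Char) :
    PySem.Chars.join ['/']
        ((pvSplitSpec cs).map (fun c => if c = [] ∨ c = ['.'] then c else '{' :: ns ++ '}' :: c))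
      = pvAltGo ns cs := by
  fun_induction pvAltGo ns cs with
  | case1 => simp [pvSplitSpec, PySem.Chars.join_singleton]
  | case2 rest ih =>
    rw [show pvSplitSpec ('/' :: rest) = [] :: pvSplitSpec rest from by simp [pvSplitSpec]]
    cases h : (pvSplitSpec rest).map (fun c => if c = [] ∨ c = ['.'] then c else '{' :: ns ++ '}' :: c) with
    | nil => exact absurd (List.map_eq_nil_iff.mp h) (pvSplitSpec_ne_nil rest)
    | cons p ps =>
      rw [List.map_cons, h, PySem.Chars.join_cons_cons, ← h, ih]
      simp
  | case3 c rest hc ih =>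
    rw [pvSplitSpec_head c rest hc]
    cases hdrop : rest.dropWhile (· ≠ '/') with
    | nil =>
      simp only [List.map_cons, List.map_nil, PySem.Chars.join_singleton, pvAltGo, List.append_nil]
      exact pv_f_eq_repl ns _ (by simp)
    | cons d r =>
      have hd : d = '/' := by simpa using pv_dropWhile_head_false rest d r hdrop
      subst hd
      rw [hdrop] at ih
      rw [show (match ('/' :: r : List Char) with | [] => ([] : List (List Char)) | _ :: x => pvSplitSpec x) = pvSplitSpec r from rfl]
      cases h : (pvSplitSpec r).map (fun c => if c = [] ∨ c = ['.'] then c else '{' :: ns ++ '}' :: c) with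
      | nil => exact absurd (List.map_eq_nil_iff.mp h) (pvSplitSpec_ne_nil r)
      | cons p ps =>
        rw [show pvSplitSpec ('/' :: r) = [] :: pvSplitSpec r from by simp [pvSplitSpec],
            List.map_cons, h, PySem.Chars.join_cons_cons] at ih
        simp only [List.nil_append, List.singleton_append] at ih
        simp only [List.map_cons, h]
        rw [PySem.Chars.join_cons_cons, pv_f_eq_repl ns _ (by simp), ← ih]
        simp

-- ===== VERDICT (by name: the statement is the Claim_ definition above) =====
theorem xpath_ns_py_spec : Claim_equal_xpath_ns_py := by
  intro path namespace_ _
  unfold Spec_xpath_ns_py xpath_ns_py xpath_ns_py_alt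
  cases namespace_ with
  | none => rfl
  | some ns =>
    by_cases h : ns = ""
    · simp [h]
    · simp only [if_neg h]
      rw [pv_splitOn_eq, pv_foldl_map, List.nil_append, pv_core]
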